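-- pv_equiv track=rewrite | github.com/Beliavsky/Pure-Fortran | xparam.py | split_code_comment
-- ===== SOURCE A (Python) =====
-- from typing import Dict, Iterable, List, Optional, Set, Tuple
--
-- def split_code_comment(raw_line: str) -> Tuple[str, str]:
--     """Split one source line into code and trailing comment text."""
--     in_single = False
--     in_double = False
--     for i, ch in enumerate(raw_line):
--         if ch == "'" and not in_double:
--             in_single = not in_single
--         elif ch == '"' and not in_single:
--             in_double = not in_double
--         elif ch == "!" and not in_single and not in_double:
--             return raw_line[:i], raw_line[i:]
--     return raw_line, ""
-- ===== SOURCE B (Python) =====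
-- def split_code_comment(raw_line):
--     """Split one source line into code and trailing comment text."""
--     i = 0
--     n = len(raw_line)
--     while i < n:
--         ch = raw_line[i]
--         if ch == "'" or ch == '"':
--             j = raw_line.find(ch, i + 1)
--             if j == -1:
--                 return raw_line, ""
--             i = j + 1
--         elif ch == "!":
--             return raw_line[:i], raw_line[i:]
--         else:
--             i += 1
--     return raw_line, ""
-- ===== Notes on version B (the rewrite author's own statement) =====
-- stated objective: idiomatic
-- what changed: Replaced the per-character quote-state machine (two boolean flags) by an index loop that skips each quoted span wholesale with str.find and splits at the first unquoted comment character.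
import Mathlib
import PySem

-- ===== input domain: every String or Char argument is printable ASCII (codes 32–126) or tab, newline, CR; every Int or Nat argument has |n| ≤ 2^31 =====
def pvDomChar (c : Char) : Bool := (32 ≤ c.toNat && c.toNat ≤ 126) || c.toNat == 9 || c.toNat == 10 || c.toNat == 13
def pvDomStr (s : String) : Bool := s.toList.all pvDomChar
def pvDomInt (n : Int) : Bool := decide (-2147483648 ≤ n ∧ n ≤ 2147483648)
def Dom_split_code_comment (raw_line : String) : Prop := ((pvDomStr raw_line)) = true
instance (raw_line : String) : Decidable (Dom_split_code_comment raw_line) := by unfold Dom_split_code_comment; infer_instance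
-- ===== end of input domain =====

-- B replaces A's per-character quote-state machine by an index loop that skips
-- each quoted span wholesale via find; same cost, more idiomatic.

-- ===== PORT A =====
-- A's for-loop over enumerate(raw_line) with the two boolean flags, step for step.
def pvAGo (full : List Char) : List Char → Nat → Bool → Bool → String × String
  | [], _, _, _ => (String.ofList full, "")
  | c :: rest, i, insng, indbl =>
    if c = '\'' ∧ indbl = false then pvAGo full rest (i + 1) (!insng) indbl
    else if c = '"' ∧ insng = false then pvAGo full rest (i + 1) insng (!indbl)
    else if c = '!' ∧ insng = false ∧ indbl = false then
      (String.ofList (full.take i), String.ofList (full.drop i))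
    else pvAGo full rest (i + 1) insng indbl

def split_code_comment (raw_line : String) : String × String :=
  pvAGo raw_line.toList raw_line.toList 0 false false

-- ===== PORT B =====
-- B's while-loop: on a quote, jump past the matching close quote (str.find);
-- on '!', split; otherwise advance by one.
def pvBGo (full : List Char) : List Char → Nat → String × String
  | [], _ => (String.ofList full, "")
  | c :: rest, i =>
    if c = '\'' ∨ c = '"' then
      match h : rest.findIdx? (· = c) with
      | none => (String.ofList full, "")
      | some k =>
          pvBGo full (rest.drop (k + 1)) (i + k + 2)
    else if c = '!' then (String.ofList (full.take i), String.ofList (full.drop i))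
    else pvBGo full rest (i + 1)
termination_by l => l.length
decreasing_by
  all_goals simp

def split_code_comment_alt (raw_line : String) : String × String :=
  pvBGo raw_line.toList raw_line.toList 0

-- ===== PRECONDITION & SPEC =====
def Spec_split_code_comment (raw_line : String) (out : String × String) : Prop := out = split_code_comment_alt raw_line
instance (raw_line : String) (out : String × String) : Decidable (Spec_split_code_comment raw_line out) := by unfold Spec_split_code_comment; infer_instance

-- ===== CLAIM (what is proved, stated in full; the proofs are below) =====
def Claim_equal_split_code_comment : Prop := ∀ (raw_line : String), Dom_split_code_comment raw_line → Spec_split_code_comment raw_line (split_code_comment raw_line)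

-- ===== LEMMAS AND PROOFS =====

-- Inside a quoted span opened by q, A's state machine ignores everything until
-- the first occurrence of q, then returns to the neutral state.
lemma pvAGo_single (full : List Char) :
    ∀ (l : List Char) (i : Nat),
      pvAGo full l i true false =
        match l.findIdx? (· = '\'') with
        | none => (String.ofList full, "")
        | some k => pvAGo full (l.drop (k + 1)) (i + k + 1) false false := by
  intro l
  induction l with
  | nil => intro i; simp [pvAGo]
  | cons c rest ih =>
    intro i
    by_cases hc : c = '\''
    · subst hc
      simp [pvAGo, List.findIdx?_cons]
    · simp [pvAGo, hc, List.findIdx?_cons, ih (i + 1)]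
      cases h : rest.findIdx? (· = '\'') with
      | none => simp
      | some k => simp; ring_nf

lemma pvAGo_double (full : List Char) :
    ∀ (l : List Char) (i : Nat),
      pvAGo full l i false true =
        match l.findIdx? (· = '"') with
        | none => (String.ofList full, "")
        | some k => pvAGo full (l.drop (k + 1)) (i + k + 1) false false := by
  intro l
  induction l with
  | nil => intro i; simp [pvAGo]
  | cons c rest ih =>
    intro i
    by_cases hc : c = '"'
    · subst hc
      simp [pvAGo, List.findIdx?_cons]
    · by_cases hq : c = '\''
      · subst hq
        simp [pvAGo, List.findIdx?_cons, ih (i + 1)]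
        cases h : rest.findIdx? (· = '"') with
        | none => simp
        | some k => simp; ring_nf
      · simp [pvAGo, hc, hq, List.findIdx?_cons, ih (i + 1)]
        cases h : rest.findIdx? (· = '"') with
        | none => simp
        | some k => simp; ring_nf

-- In the neutral state the two loops agree.
lemma pvAGo_eq_pvBGo (full : List Char) :
    ∀ (n : Nat) (l : List Char), l.length ≤ n → ∀ (i : Nat),
      pvAGo full l i false false = pvBGo full l i := by
  intro n
  induction n with
  | zero =>
    intro l hl i
    have : l = [] := by
      cases l with
      | nil => rfl
      | cons c r => simp at hl
    subst this; rw [pvBGo.eq_def]; simp [pvAGo]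
  | succ m ih =>
    intro l hl i
    cases l with
    | nil => rw [pvBGo.eq_def]; simp [pvAGo]
    | cons c rest =>
      simp at hl
      by_cases h1 : c = '\''
      · subst h1
        rw [pvAGo, pvBGo.eq_def]
        simp [pvAGo_single full rest (i + 1)]
        cases h : rest.findIdx? (· = '\'') with
        | none => simp
        | some k =>
          simp
          have hk : (rest.drop (k + 1)).length ≤ m := by
            have := List.length_drop (l := rest) (i := k + 1)
            omega
          have := ih (rest.drop (k + 1)) hk (i + k + 2)
          rw [show i + 1 + k + 1 = i + k + 2 by ring, this]
      · by_cases h2 : c = '"'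
        · subst h2
          rw [pvAGo, pvBGo.eq_def]
          simp [pvAGo_double full rest (i + 1)]
          cases h : rest.findIdx? (· = '"') with
          | none => simp
          | some k =>
            simp
            have hk : (rest.drop (k + 1)).length ≤ m := by
              have := List.length_drop (l := rest) (i := k + 1)
              omega
            have := ih (rest.drop (k + 1)) hk (i + k + 2)
            rw [show i + 1 + k + 1 = i + k + 2 by ring, this]
        · by_cases h3 : c = '!'
          · subst h3
            rw [pvAGo, pvBGo.eq_def]
            simp
          · rw [pvAGo, pvBGo.eq_def]
            simp [h1, h2, h3, ih rest hl (i + 1)]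

-- ===== VERDICT (by name: the statement is the Claim_ definition above) =====
theorem split_code_comment_spec : Claim_equal_split_code_comment := by
  intro raw_line _
  unfold Spec_split_code_comment split_code_comment split_code_comment_alt
  exact pvAGo_eq_pvBGo raw_line.toList raw_line.toList.length raw_line.toList le_rfl 0
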